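-- pv_equiv track=rewrite | github.com/xilin0770/edu_system | knowledge/processor/query_process/nodes/answer_output_node.py | _format_kg_triples
-- ===== SOURCE A (Python) =====
-- from typing import List, Dict, Any, Tuple
--
-- def _format_kg_triples(kg_triples: List, char_budget: int) -> Tuple[str, int]:
--     formatted_lines = []
--     used_chars = 0
--     for triple in kg_triples:
--         triple_text = (str(triple) if triple is not None else "").strip()
--         if not triple_text:
--             continue
--         if used_chars + len(triple_text) > char_budget:
--             break
--         formatted_lines.append(triple_text)
--         used_chars += len(triple_text) + 1
--     return "\n".join(formatted_lines), char_budget - used_chars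
-- ===== SOURCE B (Python) =====
-- def _format_kg_triples(kg_triples, char_budget):
--     # Pipeline: clean texts -> prefix-sum table of (len+1) -> binary search for the
--     # cutoff (prefix sums are strictly increasing, so "fits" is a monotone predicate).
--     texts = [t for t in ((str(x) if x is not None else "").strip() for x in kg_triples) if t]
--     prefix = []
--     total = 0
--     for t in texts:
--         total += len(t) + 1
--         prefix.append(total)
--     lo, hi = 0, len(prefix)
--     while lo < hi:
--         mid = (lo + hi) // 2
--         if prefix[mid] <= char_budget + 1:
--             lo = mid + 1
--         else:
--             hi = mid
--     used = prefix[lo - 1] if lo > 0 else 0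
--     return "\n".join(texts[:lo]), char_budget - used
-- ===== Notes on version B (the rewrite author's own statement) =====
-- stated objective: alternative
-- what changed: Replaces A's single stateful loop with break by a pipeline: clean the stripped texts, build a prefix-sum table of (len+1), binary-search the table for how many leading texts fit (the break condition is equivalent to prefix <= budget+1, monotone since prefix sums are strictly increasing), then slice and join.
import Mathlib
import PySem

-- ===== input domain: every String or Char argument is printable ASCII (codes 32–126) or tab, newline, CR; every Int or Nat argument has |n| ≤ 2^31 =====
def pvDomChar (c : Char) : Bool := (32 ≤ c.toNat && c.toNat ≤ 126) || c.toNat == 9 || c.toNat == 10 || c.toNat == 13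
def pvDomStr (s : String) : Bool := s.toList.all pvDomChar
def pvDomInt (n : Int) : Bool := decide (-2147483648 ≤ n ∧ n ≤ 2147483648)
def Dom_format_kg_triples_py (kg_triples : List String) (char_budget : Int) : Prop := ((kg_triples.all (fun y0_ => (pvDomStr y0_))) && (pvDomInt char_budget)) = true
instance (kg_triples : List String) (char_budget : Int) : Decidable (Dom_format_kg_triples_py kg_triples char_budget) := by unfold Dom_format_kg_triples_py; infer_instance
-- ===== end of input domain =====

-- B replaces A's stateful break-loop by a cleaned-list / prefix-sum-table / binary-search decomposition (alternative, same cost).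


-- ===== PORT A =====
-- A's loop: skip empty strips, break when used + len > budget, else append and count len+1.
def pvALoop (char_budget : Int) (triples : List String) (lines : List String) (used : Int) : String × Int :=
  match triples with
  | [] => (PySem.Str.join "\n" lines, char_budget - used)
  | t :: rest =>
    if PySem.Str.strip t = "" then pvALoop char_budget rest lines used
    else if char_budget < used + PySem.Str.len (PySem.Str.strip t) then
      (PySem.Str.join "\n" lines, char_budget - used)
    else pvALoop char_budget rest (lines ++ [PySem.Str.strip t])
      (used + PySem.Str.len (PySem.Str.strip t) + 1)

def format_kg_triples_py (kg_triples : List String) (char_budget : Int) : String × Int :=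
  pvALoop char_budget kg_triples [] 0

-- ===== PORT B =====
-- hand-written binary search from Source B (prefix[mid] is always in range on Source B's calls, so getD is exact there)
def pvBsearch (ps : List Int) (x : Int) (lo hi : Nat) : Nat :=
  if h : lo < hi then
    let mid := (lo + hi) / 2
    if ps.getD mid 0 ≤ x then pvBsearch ps x (mid + 1) hi
    else pvBsearch ps x lo mid
  else lo
termination_by hi - lo
decreasing_by all_goals omega

def format_kg_triples_py_alt (kg_triples : List String) (char_budget : Int) : String × Int :=
  let texts := (kg_triples.map PySem.Str.strip).filter (fun t => t ≠ "")
  let pref := (texts.foldl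
    (fun acc t => (acc.1 ++ [acc.2 + PySem.Str.len t + 1], acc.2 + PySem.Str.len t + 1)) ([], 0)).1
  let lo := pvBsearch pref (char_budget + 1) 0 pref.length
  let used := if lo = 0 then 0 else pref.getD (lo - 1) 0
  (PySem.Str.join "\n" (texts.take lo), char_budget - used)

-- ===== PRECONDITION & SPEC =====
def Spec_format_kg_triples_py (kg_triples : List String) (char_budget : Int) (out : String × Int) : Prop := out = format_kg_triples_py_alt kg_triples char_budget
instance (kg_triples : List String) (char_budget : Int) (out : String × Int) : Decidable (Spec_format_kg_triples_py kg_triples char_budget out) := by unfold Spec_format_kg_triples_py; infer_instance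

-- ===== CLAIM (what is proved, stated in full; the proofs are below) =====
def Claim_equal_format_kg_triples_py : Prop := ∀ (kg_triples : List String) (char_budget : Int), Dom_format_kg_triples_py kg_triples char_budget → Spec_format_kg_triples_py kg_triples char_budget (format_kg_triples_py kg_triples char_budget)

-- ===== LEMMAS AND PROOFS =====

-- the cleaned text list (B's `texts`)
def pvClean (ts : List String) : List String := (ts.map PySem.Str.strip).filter (fun t => t ≠ "")

-- number of leading texts A keeps when `r` chars remain
def pvCut : List String → Int → Nat
  | [], _ => 0
  | t :: rest, r => if r < PySem.Str.len t then 0 else pvCut rest (r - PySem.Str.len t - 1) + 1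

-- reference prefix-sum list starting at base b
def pvPre : List String → Int → List Int
  | [], _ => []
  | t :: rest, b => (b + PySem.Str.len t + 1) :: pvPre rest (b + PySem.Str.len t + 1)

-- total (len+1)-weight
def pvW (ts : List String) : Int := (ts.map (fun t => PySem.Str.len t + 1)).sum

lemma pvLen_nonneg (t : String) : 0 ≤ PySem.Str.len t := by
  rw [PySem.Str.len_eq]; exact Int.natCast_nonneg _

lemma pvClean_cons (t : String) (ts : List String) :
    pvClean (t :: ts) = if PySem.Str.strip t = "" then pvClean ts
      else PySem.Str.strip t :: pvClean ts := by
  by_cases h : PySem.Str.strip t = "" <;> simp [pvClean, h]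

lemma pvFold_aux (ts : List String) : ∀ (acc : List Int) (b : Int),
    ts.foldl (fun acc t => (acc.1 ++ [acc.2 + PySem.Str.len t + 1], acc.2 + PySem.Str.len t + 1))
      (acc, b) = (acc ++ pvPre ts b, b + pvW ts) := by
  induction ts with
  | nil => intro acc b; simp [pvPre, pvW]
  | cons t rest ih =>
    intro acc b
    simp only [List.foldl_cons, ih, pvPre, pvW, List.map_cons, List.sum_cons, Prod.mk.injEq]
    exact ⟨by simp, by ring⟩

lemma pvPre_length (ts : List String) : ∀ b, (pvPre ts b).length = ts.length := by
  induction ts with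
  | nil => intro b; simp [pvPre]
  | cons t rest ih => intro b; simp [pvPre, ih]

lemma pvPre_getD (ts : List String) : ∀ (b : Int) (i : Nat), i < ts.length →
    (pvPre ts b).getD i 0 = b + pvW (ts.take (i + 1)) := by
  induction ts with
  | nil => intro b i h; simp at h
  | cons t rest ih =>
    intro b i h
    cases i with
    | zero => simp [pvPre, pvW, PySem.Str.len_eq]; ring
    | succ i =>
      simp only [pvPre, List.getD_cons_succ]
      rw [ih _ i (by simpa using h)]
      simp [pvW]; ring

lemma pvCut_le (ts : List String) : ∀ r, pvCut ts r ≤ ts.length := by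
  induction ts with
  | nil => intro r; simp [pvCut]
  | cons t rest ih =>
    intro r
    simp only [pvCut, List.length_cons]
    split
    · omega
    · have := ih (r - PySem.Str.len t - 1); omega

lemma pvPre_pos (ts : List String) : ∀ (b : Int) (i : Nat), i < ts.length →
    b < (pvPre ts b).getD i 0 := by
  induction ts with
  | nil => intro b i h; simp at h
  | cons t rest ih =>
    intro b i h
    cases i with
    | zero =>
      have h1 := pvLen_nonneg t
      simp only [pvPre, List.getD_cons_zero]
      omega
    | succ i =>
      simp only [pvPre, List.getD_cons_succ]
      have := ih (b + PySem.Str.len t + 1) i (by simpa using h)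
      have := pvLen_nonneg t
      omega

lemma pvPre_le (ts : List String) : ∀ (r b : Int) (i : Nat), i < pvCut ts r →
    (pvPre ts b).getD i 0 ≤ b + r + 1 := by
  induction ts with
  | nil => intro r b i h; simp [pvCut] at h
  | cons t rest ih =>
    intro r b i h
    simp only [pvCut] at h
    split at h
    · omega
    · rename_i hle
      cases i with
      | zero => simp only [pvPre, List.getD_cons_zero]; omega
      | succ i =>
        simp only [pvPre, List.getD_cons_succ]
        have := ih (r - PySem.Str.len t - 1) (b + PySem.Str.len t + 1) i (by omega)
        omega

lemma pvPre_gt (ts : List String) : ∀ (r b : Int) (i : Nat), pvCut ts r ≤ i → i < ts.length →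
    b + r + 1 < (pvPre ts b).getD i 0 := by
  induction ts with
  | nil => intro r b i _ h; simp at h
  | cons t rest ih =>
    intro r b i hk h
    simp only [pvCut] at hk
    split at hk
    · rename_i hlt
      cases i with
      | zero => simp only [pvPre, List.getD_cons_zero]; omega
      | succ i =>
        simp only [pvPre, List.getD_cons_succ]
        have := pvPre_pos rest (b + PySem.Str.len t + 1) i (by simpa using h)
        omega
    · rename_i hle
      cases i with
      | zero => omega
      | succ i =>
        simp only [pvPre, List.getD_cons_succ]
        have := ih (r - PySem.Str.len t - 1) (b + PySem.Str.len t + 1) i (by omega) (by simpa using h)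
        omega

lemma pvBsearch_eq (ps : List Int) (x : Int) (k : Nat)
    (hle : ∀ i, i < k → ps.getD i 0 ≤ x)
    (hgt : ∀ i, k ≤ i → i < ps.length → x < ps.getD i 0) :
    ∀ (n lo hi : Nat), hi - lo ≤ n → lo ≤ k → k ≤ hi → hi ≤ ps.length →
      pvBsearch ps x lo hi = k := by
  intro n
  induction n with
  | zero =>
    intro lo hi hn h1 h2 h3
    rw [pvBsearch]
    have : ¬ lo < hi := by omega
    simp [this]; omega
  | succ n ih =>
    intro lo hi hn h1 h2 h3
    rw [pvBsearch]
    by_cases hlt : lo < hi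
    · simp only [hlt, dif_pos]
      by_cases hcmp : ps.getD ((lo + hi) / 2) 0 ≤ x
      · simp only [hcmp, if_pos]
        have hmk : (lo + hi) / 2 < k := by
          by_contra hc
          exact absurd hcmp (not_le.2 (hgt _ (by omega) (by omega)))
        exact ih ((lo + hi) / 2 + 1) hi (by omega) (by omega) h2 h3
      · simp only [hcmp, if_neg, not_false_iff]
        have hmk : k ≤ (lo + hi) / 2 := by
          by_contra hc
          exact hcmp (hle _ (by omega))
        exact ih lo ((lo + hi) / 2) (by omega) h1 hmk (by omega)
    · simp [hlt]; omega

lemma pvALoop_eq (b : Int) : ∀ (ts lines : List String) (used : Int),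
    pvALoop b ts lines used =
      (PySem.Str.join "\n" (lines ++ (pvClean ts).take (pvCut (pvClean ts) (b - used))),
       b - used - pvW ((pvClean ts).take (pvCut (pvClean ts) (b - used)))) := by
  intro ts
  induction ts with
  | nil => intro lines used; simp [pvALoop, pvClean, pvCut, pvW]
  | cons t rest ih =>
    intro lines used
    rw [pvALoop, pvClean_cons]
    by_cases he : PySem.Str.strip t = ""
    · rw [if_pos he, if_pos he, ih]
    · rw [if_neg he, if_neg he]
      by_cases hb : b < used + PySem.Str.len (PySem.Str.strip t)
      · have hcut : pvCut (PySem.Str.strip t :: pvClean rest) (b - used) = 0 := by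
          simp only [pvCut]; rw [if_pos (by omega)]
        rw [if_pos hb, hcut]
        simp [pvW]
      · have hcut : pvCut (PySem.Str.strip t :: pvClean rest) (b - used)
            = pvCut (pvClean rest) (b - used - PySem.Str.len (PySem.Str.strip t) - 1) + 1 := by
          simp only [pvCut]; rw [if_neg (by omega)]
        rw [if_neg hb, ih]
        have harg : b - (used + PySem.Str.len (PySem.Str.strip t) + 1)
            = b - used - PySem.Str.len (PySem.Str.strip t) - 1 := by ring
        rw [harg, hcut]
        simp only [List.take_succ_cons, pvW, List.map_cons, List.sum_cons, List.append_assoc,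
          List.singleton_append, Prod.mk.injEq]
        exact ⟨trivial, by ring⟩

-- ===== VERDICT (by name: the statement is the Claim_ definition above) =====
theorem format_kg_triples_py_spec : Claim_equal_format_kg_triples_py := by
  intro kg cb _
  unfold Spec_format_kg_triples_py format_kg_triples_py format_kg_triples_py_alt
  rw [pvALoop_eq]
  have hfold := pvFold_aux (pvClean kg) [] 0
  simp only [pvClean] at hfold ⊢
  rw [hfold]
  simp only [List.nil_append]
  set C := (kg.map PySem.Str.strip).filter (fun t => t ≠ "") with hC
  set k := pvCut C (cb - 0) with hk
  have hkc : pvCut C cb = k := by rw [hk]; norm_num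
  have hlen : (pvPre C 0).length = C.length := pvPre_length C 0
  have hkle : k ≤ C.length := by rw [hk]; simpa using pvCut_le C (cb - 0)
  have hbs : pvBsearch (pvPre C 0) (cb + 1) 0 (pvPre C 0).length = k := by
    apply pvBsearch_eq (pvPre C 0) (cb + 1) k
      (fun i hi => by
        have := pvPre_le C (cb - 0) 0 i (by rwa [← hk]); omega)
      (fun i h1 h2 => by
        have := pvPre_gt C (cb - 0) 0 i (by rwa [← hk]) (by omega); omega)
      ((pvPre C 0).length) 0 (pvPre C 0).length (by omega) (by omega) (by omega) (by omega)
  rw [hbs]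
  have hused : (if k = 0 then (0 : Int) else (pvPre C 0).getD (k - 1) 0) = pvW (C.take k) := by
    by_cases h0 : k = 0
    · simp [h0, pvW]
    · rw [if_neg h0, pvPre_getD C 0 (k - 1) (by omega)]
      have : k - 1 + 1 = k := by omega
      rw [this]; ring
  rw [hused]
  simp only [Prod.mk.injEq]
  exact ⟨trivial, by ring⟩
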